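-- pv_equiv track=rewrite | github.com/ypradhan222/mtech_code | ALgorithms/heapify_bottom.py | min_heap
-- ===== SOURCE A (Python) =====
-- def heapify_bottom(array,index):
--    count =0
--    size = len(array)
--    root = index
--    left = 2*index+1
--    right = 2*index+2
--    if left<size and array[left]<array[root]:
--       root = left
--    if right <size and array[right]<array[root]:
--       root = right
--    if root != index:
--       array[root],array[index]=array[index],array[root]
--       count+=1
--       heapify_bottom(array, root)
--    return count
--
-- def min_heap(array):
--    counter=0
--    n= len(array)
--    i = n//2-1
--    while i>=0:
--       counter+=heapify_bottom(array, i)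
--       i-=1
--    return array,counter
-- ===== SOURCE B (Python) =====
-- def min_heap(array):
--     n = len(array)
--     counter = 0
--     for i in reversed(range(n // 2)):
--         cur = i
--         moved = False
--         while 2 * cur + 1 < n:
--             c = 2 * cur + 1
--             if c + 1 < n and array[c + 1] < array[c]:
--                 c = c + 1
--             if array[c] >= array[cur]:
--                 break
--             array[cur], array[c] = array[c], array[cur]
--             cur = c
--             moved = True
--         if moved:
--             counter += 1
--     return array, counter
-- ===== Notes on version B (the rewrite author's own statement) =====
-- stated objective: alternative
-- what changed: A's recursive sift-down with left-then-right sequential comparisons (discarding recursive counts) is replaced by a countdown recursion whose inner loop first selects the minimum child and swaps only if it beats the parent, tracking a boolean 'moved' flag per start instead of integer counts.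
import Mathlib
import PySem

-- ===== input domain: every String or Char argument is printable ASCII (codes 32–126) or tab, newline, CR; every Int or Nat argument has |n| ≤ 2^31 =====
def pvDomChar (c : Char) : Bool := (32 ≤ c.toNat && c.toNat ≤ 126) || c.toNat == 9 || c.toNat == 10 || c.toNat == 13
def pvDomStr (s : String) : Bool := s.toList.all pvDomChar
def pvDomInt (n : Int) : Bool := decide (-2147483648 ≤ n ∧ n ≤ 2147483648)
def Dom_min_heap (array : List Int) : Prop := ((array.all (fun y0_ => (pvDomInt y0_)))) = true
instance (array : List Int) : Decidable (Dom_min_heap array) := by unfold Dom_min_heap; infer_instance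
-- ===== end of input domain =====

-- B selects the minimum child first and uses a boolean moved-flag with a countdown recursion,
-- instead of A's recursive left-then-right sift; both Pythons mutate the list in place, the
-- equivalence proved is about the return value.

-- ===== PORT A =====
-- port of heapify_bottom; returns (mutated array, count). The recursive call's count is
-- discarded, exactly as in the Python. The fuel only makes the recursion structural: the sift
-- index strictly increases and stays < arr.length, so fuel = arr.length is never exhausted.
def heapify_go (fuel : Nat) (arr : List Int) (index : Nat) : List Int × Int :=
  match fuel with
  | 0 => (arr, 0)
  | fuel + 1 =>
    let size := arr.length
    let left := 2 * index + 1
    let right := 2 * index + 2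
    let root1 := if left < size ∧ arr.getD left 0 < arr.getD index 0 then left else index
    let root := if right < size ∧ arr.getD right 0 < arr.getD root1 0 then right else root1
    if root ≠ index then
      let vi := arr.getD index 0
      let vr := arr.getD root 0
      let arr2 := (arr.set root vi).set index vr
      ((heapify_go fuel arr2 root).1, 1)
    else
      (arr, 0)

def heapify_bottom (arr : List Int) (index : Nat) : List Int × Int :=
  heapify_go arr.length arr index

-- port of min_heap's while loop: i runs from n//2-1 down to 0
def min_heap (array : List Int) : List Int × Int :=
  (List.range (array.length / 2)).reverse.foldl
    (fun st i =>
      let r := heapify_bottom st.1 i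
      (r.1, st.2 + r.2))
    (array, 0)

-- ===== PORT B =====
-- B's inner while loop: as long as cur has a left child, pick the smaller child c
-- (left on ties), stop if arr[c] >= arr[cur], else swap, move down, set moved := true.
-- Fuel = arr.length makes the loop structural and is never exhausted (cur strictly grows).
def siftB (fuel : Nat) (arr : List Int) (cur : Nat) (moved : Bool) : List Int × Bool :=
  match fuel with
  | 0 => (arr, moved)
  | fuel + 1 =>
    if 2 * cur + 1 < arr.length then
      let c := if 2 * cur + 2 < arr.length ∧ arr.getD (2 * cur + 2) 0 < arr.getD (2 * cur + 1) 0
               then 2 * cur + 2 else 2 * cur + 1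
      if arr.getD cur 0 ≤ arr.getD c 0 then (arr, moved)
      else siftB fuel ((arr.set c (arr.getD cur 0)).set cur (arr.getD c 0)) c true
    else (arr, moved)

-- B's outer for-loop as a countdown recursion: i = k-1, k-2, …, 0
def buildB (arr : List Int) (counter : Int) : Nat → List Int × Int
  | 0 => (arr, counter)
  | k + 1 =>
    let r := siftB arr.length arr k false
    buildB r.1 (if r.2 then counter + 1 else counter) k

def min_heap_alt (array : List Int) : List Int × Int :=
  buildB array 0 (array.length / 2)

-- ===== PRECONDITION & SPEC =====
def Spec_min_heap (array : List Int) (out : List Int × Int) : Prop := out = min_heap_alt array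
instance (array : List Int) (out : List Int × Int) : Decidable (Spec_min_heap array out) := by unfold Spec_min_heap; infer_instance

-- ===== CLAIM =====
def Claim_equal_min_heap : Prop := ∀ (array : List Int), Dom_min_heap array → Spec_min_heap array (min_heap array)

-- ===== LEMMAS AND PROOFS =====

-- A's count at positive fuel is 0 or 1
theorem heapify_go_count (fuel : Nat) (arr : List Int) (index : Nat) :
    (heapify_go fuel arr index).2 = 0 ∨ (heapify_go fuel arr index).2 = 1 := by
  cases fuel with
  | zero => left; rfl
  | succ fuel =>
    rw [heapify_go]
    split_ifs <;> simp

-- B's min-child sift computes A's array, and its flag is moved OR "A swapped at the top";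
-- the case analysis over the comparison outcomes is mechanical, split_ifs + omega
theorem siftB_eq (fuel : Nat) (arr : List Int) (cur : Nat) (m : Bool) :
    siftB fuel arr cur m
      = ((heapify_go fuel arr cur).1, m || decide ((heapify_go fuel arr cur).2 ≠ 0)) := by
  induction fuel generalizing arr cur m with
  | zero => simp [siftB, heapify_go]
  | succ fuel ih =>
    simp only [siftB, heapify_go]
    split_ifs <;>
      first
        | (exfalso; omega)
        | (rw [ih]; simp)
        | simp

-- B's countdown recursion equals A's fold over the reversed range
theorem buildB_eq (k : Nat) (arr : List Int) (c : Int) :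
    buildB arr c k
      = (List.range k).reverse.foldl
          (fun st i =>
            let r := heapify_bottom st.1 i
            (r.1, st.2 + r.2))
          (arr, c) := by
  induction k generalizing arr c with
  | zero => simp [buildB]
  | succ k ih =>
    rw [buildB, List.range_succ]
    simp only [List.reverse_append, List.reverse_cons, List.reverse_nil, List.nil_append,
      List.cons_append, List.foldl_cons]
    rw [siftB_eq]
    rcases heapify_go_count arr.length arr k with h | h <;>
      simp [heapify_bottom, h, ih]

-- ===== VERDICT =====
theorem min_heap_spec : Claim_equal_min_heap := by
  intro array _
  unfold Spec_min_heap min_heap min_heap_alt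
  rw [buildB_eq]
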